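-- pv_equiv track=rewrite | github.com/Unarmed1000/build-check | buildCheckLibraryGraph.py | find_impacted_targets
-- ===== SOURCE A (Python) =====
-- from typing import Dict, Set, List, Tuple, Optional
-- from collections import defaultdict, deque
--
-- def find_impacted_targets(library: str,
--                           lib_to_libs: Dict[str, Set[str]],
--                           exe_to_libs: Dict[str, Set[str]]) -> Tuple[Set[str], Set[str]]:
--     """
--     Find all libraries and executables that would be impacted by changes to the given library.
--     Returns (impacted_libs, impacted_exes)
--     """
--     impacted_libs = set()
--     impacted_exes = set()
--
--     # Build reverse dependency graph
--     visited = set()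
--     queue = deque([library])
--
--     while queue:
--         current = queue.popleft()
--         if current in visited:
--             continue
--         visited.add(current)
--
--         # Find libraries that depend on current
--         for lib, deps in lib_to_libs.items():
--             if current in deps and lib not in visited:
--                 impacted_libs.add(lib)
--                 queue.append(lib)
--
--         # Find executables that depend on current
--         for exe, deps in exe_to_libs.items():
--             if current in deps:
--                 impacted_exes.add(exe)
--
--     return impacted_libs, impacted_exes
-- ===== SOURCE B (Python) =====
-- from typing import Dict, Set, Tuple
-- from collections import deque
--
--
-- def find_impacted_targets(library: str,
--                           lib_to_libs: Dict[str, Set[str]],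
--                           exe_to_libs: Dict[str, Set[str]]) -> Tuple[Set[str], Set[str]]:
--     """
--     Find all libraries and executables that would be impacted by changes to the given library.
--     Returns (impacted_libs, impacted_exes)
--
--     Precomputes reverse-dependency indexes once, then runs a single BFS over
--     those indexes rather than rescanning the dicts at every visited node.
--     """
--     rev_libs: Dict[str, list] = {}
--     rev_exes: Dict[str, list] = {}
--     for lib, deps in lib_to_libs.items():
--         for d in set(deps):
--             rev_libs.setdefault(d, []).append(lib)
--     for exe, deps in exe_to_libs.items():
--         for d in set(deps):
--             rev_exes.setdefault(d, []).append(exe)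
--
--     impacted_libs = set()
--     impacted_exes = set()
--     visited = set()
--     queue = deque([library])
--
--     while queue:
--         current = queue.popleft()
--         if current in visited:
--             continue
--         visited.add(current)
--
--         impacted_exes.update(rev_exes.get(current, ()))
--
--         newly_reached = [lib for lib in rev_libs.get(current, ()) if lib not in visited]
--         impacted_libs.update(newly_reached)
--         queue.extend(newly_reached)
--
--     return impacted_libs, impacted_exes
-- ===== Notes on version B (the rewrite author's own statement) =====
-- stated objective: alternative
-- what changed: B builds reverse-dependency index maps (dep -> dependents) once and runs the BFS with direct lookups and bulk set updates, instead of A's rescan of both whole dicts at every visited node.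
import Mathlib
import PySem

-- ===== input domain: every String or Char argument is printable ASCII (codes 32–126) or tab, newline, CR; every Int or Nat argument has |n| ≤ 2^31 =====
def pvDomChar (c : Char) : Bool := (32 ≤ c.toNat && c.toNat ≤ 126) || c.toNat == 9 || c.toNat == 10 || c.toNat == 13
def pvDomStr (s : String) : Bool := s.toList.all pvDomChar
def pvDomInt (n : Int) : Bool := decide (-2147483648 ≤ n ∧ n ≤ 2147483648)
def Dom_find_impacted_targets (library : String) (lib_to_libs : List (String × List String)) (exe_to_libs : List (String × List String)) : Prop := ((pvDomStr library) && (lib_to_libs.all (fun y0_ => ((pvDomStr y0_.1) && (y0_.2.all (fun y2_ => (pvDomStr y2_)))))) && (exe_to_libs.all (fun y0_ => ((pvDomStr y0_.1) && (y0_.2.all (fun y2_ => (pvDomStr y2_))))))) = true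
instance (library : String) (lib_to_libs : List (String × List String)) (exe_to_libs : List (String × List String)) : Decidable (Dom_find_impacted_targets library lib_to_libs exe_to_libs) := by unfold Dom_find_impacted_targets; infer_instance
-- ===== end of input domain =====

-- B replaces A's per-node rescan of both dicts by reverse-dependency index maps built once,
-- then a single BFS with direct lookups and bulk set updates (objective: alternative).


-- ===== PORT A =====
-- A's BFS loop: the fuel argument only makes the recursion total; it is set to an upper
-- bound on the number of queue pops (1 initial pop + at most lib_to_libs.length appends per
-- each of at most lib_to_libs.length + 1 visits), so it never runs out.
def pvLoopA (lib_to_libs exe_to_libs : List (String × List String)) :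
    Nat → List String → PySem.Set String → PySem.Set String → PySem.Set String →
    PySem.Set String × PySem.Set String
  | 0, _, _, impacted_libs, impacted_exes => (impacted_libs, impacted_exes)
  | _ + 1, [], _, impacted_libs, impacted_exes => (impacted_libs, impacted_exes)
  | fuel + 1, current :: queue, visited, impacted_libs, impacted_exes =>
    if PySem.Set.contains visited current then
      pvLoopA lib_to_libs exe_to_libs fuel queue visited impacted_libs impacted_exes
    else
      let visited' := PySem.Set.add visited current
      -- for lib, deps in lib_to_libs.items(): if current in deps and lib not in visited: …
      let st := lib_to_libs.foldl
        (fun (st : PySem.Set String × List String) p =>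
          if p.2.contains current && !(PySem.Set.contains visited' p.1) then
            (PySem.Set.add st.1 p.1, st.2 ++ [p.1])
          else st)
        (impacted_libs, queue)
      -- for exe, deps in exe_to_libs.items(): if current in deps: …
      let impacted_exes' := exe_to_libs.foldl
        (fun es p => if p.2.contains current then PySem.Set.add es p.1 else es)
        impacted_exes
      pvLoopA lib_to_libs exe_to_libs fuel st.2 visited' st.1 impacted_exes'

def find_impacted_targets (library : String) (lib_to_libs : List (String × List String)) (exe_to_libs : List (String × List String)) : List String × List String :=
  pvLoopA lib_to_libs exe_to_libs
    (1 + lib_to_libs.length * (lib_to_libs.length + 1))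
    [library] PySem.Set.empty PySem.Set.empty PySem.Set.empty

-- ===== PORT B =====
-- rev.setdefault(d, []).append(name) over all (name, deps), d in set(deps)
def pvRevBuild (l : List (String × List String)) : PySem.Dict String (List String) :=
  l.foldl
    (fun d p => (PySem.Set.ofList p.2).foldl
      (fun d dep => d.modify dep [] (· ++ [p.1])) d)
    PySem.Dict.empty

-- B's BFS loop over the reverse index maps; same totality fuel as in A's port.
def pvLoopB (revL revE : PySem.Dict String (List String)) :
    Nat → List String → PySem.Set String → PySem.Set String → PySem.Set String →
    PySem.Set String × PySem.Set String
  | 0, _, _, impacted_libs, impacted_exes => (impacted_libs, impacted_exes)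
  | _ + 1, [], _, impacted_libs, impacted_exes => (impacted_libs, impacted_exes)
  | fuel + 1, current :: queue, visited, impacted_libs, impacted_exes =>
    if PySem.Set.contains visited current then
      pvLoopB revL revE fuel queue visited impacted_libs impacted_exes
    else
      let visited' := PySem.Set.add visited current
      -- impacted_exes.update(rev_exes.get(current, ()))
      let impacted_exes' := PySem.Set.update impacted_exes (revE.getD current [])
      -- newly_reached = [lib for lib in rev_libs.get(current, ()) if lib not in visited]
      let newly_reached := (revL.getD current []).filter
        (fun lib => !(PySem.Set.contains visited' lib))
      -- impacted_libs.update(newly_reached); queue.extend(newly_reached)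
      pvLoopB revL revE fuel (queue ++ newly_reached) visited'
        (PySem.Set.update impacted_libs newly_reached) impacted_exes'

def find_impacted_targets_alt (library : String) (lib_to_libs : List (String × List String)) (exe_to_libs : List (String × List String)) : List String × List String :=
  pvLoopB (pvRevBuild lib_to_libs) (pvRevBuild exe_to_libs)
    (1 + lib_to_libs.length * (lib_to_libs.length + 1))
    [library] PySem.Set.empty PySem.Set.empty PySem.Set.empty

-- ===== PRECONDITION & SPEC =====
def Spec_find_impacted_targets (library : String) (lib_to_libs : List (String × List String)) (exe_to_libs : List (String × List String)) (out : List String × List String) : Prop := out = find_impacted_targets_alt library lib_to_libs exe_to_libs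
instance (library : String) (lib_to_libs : List (String × List String)) (exe_to_libs : List (String × List String)) (out : List String × List String) : Decidable (Spec_find_impacted_targets library lib_to_libs exe_to_libs out) := by unfold Spec_find_impacted_targets; infer_instance

-- ===== CLAIM (what is proved, stated in full; the proofs are below) =====
def Claim_equal_find_impacted_targets : Prop := ∀ (library : String) (lib_to_libs : List (String × List String)) (exe_to_libs : List (String × List String)), Dom_find_impacted_targets library lib_to_libs exe_to_libs → Spec_find_impacted_targets library lib_to_libs exe_to_libs (find_impacted_targets library lib_to_libs exe_to_libs)

-- ===== LEMMAS AND PROOFS =====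

-- In a duplicate-free list, filtering for one value yields that value once or not at all.
theorem pv_filter_beq_of_nodup (l : List String) (h : l.Nodup) (a : String) :
    l.filter (· == a) = if l.contains a then [a] else [] := by
  rw [List.filter_beq]
  by_cases hm : a ∈ l
  · have h1 : l.count a = 1 := List.count_eq_one_of_mem h hm
    simp [h1, hm]
  · simp [List.count_eq_zero.mpr hm, hm]

-- One pair's contribution of (dep, name) entries at key c.
theorem pv_per_pair (p : String × List String) (c : String) :
    ((PySem.Set.ofList p.2).map (fun dep => (dep, p.1))).filter (fun q => q.1 == c)
    = if p.2.contains c then [(c, p.1)] else [] := by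
  rw [List.filter_map]
  have hcomp : ((fun (q : String × String) => q.1 == c) ∘ (fun dep => (dep, p.1))) = (· == c) := rfl
  rw [hcomp, pv_filter_beq_of_nodup _ (PySem.Set.nodup_ofList p.2) c]
  by_cases hm : c ∈ p.2 <;> simp [hm, PySem.Set.mem_ofList]

-- Nested build loop flattened to a single modify-append loop over (dep, name) pairs.
theorem pv_flat (l : List (String × List String)) :
    ∀ d : PySem.Dict String (List String),
      l.foldl (fun d p => (PySem.Set.ofList p.2).foldl
        (fun d dep => d.modify dep [] (· ++ [p.1])) d) d
      = (l.flatMap (fun p => (PySem.Set.ofList p.2).map (fun dep => (dep, p.1)))).foldl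
          (fun d q => d.modify q.1 [] (· ++ [q.2])) d := by
  induction l with
  | nil => intro d; rfl
  | cons p l ih =>
    intro d
    simp only [List.foldl_cons, List.flatMap_cons, List.foldl_append]
    rw [List.foldl_map, ih]

-- Collapsing the per-pair contributions: second components of the surviving (c, name)
-- singletons are the first components of the pairs whose dependency list contains c.
theorem pv_flat_filter (l : List (String × List String)) (c : String) :
    (l.flatMap (fun a => if c ∈ a.2 then [(c, a.1)] else [])).map (fun x => x.2)
    = (l.filter (fun p => decide (c ∈ p.2))).map (fun x => x.1) := by
  induction l with
  | nil => rfl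
  | cons p l ih =>
    by_cases h : c ∈ p.2 <;> simp [h, ih]

-- The reverse index at key c lists exactly the first components of the pairs whose
-- dependency list contains c, in original order.
theorem pv_revBuild_getD (l : List (String × List String)) (c : String) :
    (pvRevBuild l).getD c [] = (l.filter (fun p => p.2.contains c)).map (·.1) := by
  unfold pvRevBuild
  rw [pv_flat, PySem.Dict.getD_foldl_modify_append]
  simp only [PySem.Dict.getD_empty, List.nil_append, List.filter_flatMap]
  simp [pv_per_pair, pv_flat_filter]

-- Folding A's add-and-append step over a candidate list is a bulk update/extend with
-- the visited-filtered candidates.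
theorem pv_pair_foldl (v' : PySem.Set String) :
    ∀ (cs : List String) (ls : PySem.Set String) (q : List String),
      cs.foldl
        (fun (st : PySem.Set String × List String) lib =>
          if !(PySem.Set.contains v' lib) then
            (PySem.Set.add st.1 lib, st.2 ++ [lib])
          else st)
        (ls, q)
      = (PySem.Set.update ls (cs.filter (fun lib => !(PySem.Set.contains v' lib))),
         q ++ cs.filter (fun lib => !(PySem.Set.contains v' lib))) := by
  intro cs
  induction cs with
  | nil => intro ls q; simp [PySem.Set.update]
  | cons x cs ih =>
    intro ls q
    by_cases h : x ∈ v'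
    · have hx : (!PySem.Set.contains v' x) = false := by simp [h]
      simp only [List.foldl_cons, List.filter_cons, hx]
      rw [if_neg (by decide), if_neg (by decide)]
      exact ih ls q
    · have hx : (!PySem.Set.contains v' x) = true := by simp [h]
      simp only [List.foldl_cons, List.filter_cons, hx]
      simp only [if_true]
      rw [ih (PySem.Set.add ls x) (q ++ [x])]
      simp [PySem.Set.update, List.append_assoc]

-- The two BFS loops coincide step for step once the reverse maps are those built by B.
theorem pv_loop_eq (lib_to_libs exe_to_libs : List (String × List String)) :
    ∀ (fuel : Nat) (queue : List String) (visited impacted_libs impacted_exes : PySem.Set String),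
      pvLoopB (pvRevBuild lib_to_libs) (pvRevBuild exe_to_libs) fuel queue visited impacted_libs impacted_exes
      = pvLoopA lib_to_libs exe_to_libs fuel queue visited impacted_libs impacted_exes := by
  intro fuel
  induction fuel with
  | zero => intro queue v ls es; rfl
  | succ n ih =>
    intro queue v ls es
    cases queue with
    | nil => rfl
    | cons current queue =>
      by_cases hv : PySem.Set.contains v current = true
      · simp only [pvLoopA, pvLoopB, hv, if_pos, ih]
      · simp only [pvLoopA, pvLoopB, hv, if_neg, Bool.false_eq_true, not_false_iff]
        set v' := PySem.Set.add v current with hv'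
        have hcand :
            lib_to_libs.foldl
              (fun (st : PySem.Set String × List String) p =>
                if p.2.contains current && !(PySem.Set.contains v' p.1) then
                  (PySem.Set.add st.1 p.1, st.2 ++ [p.1])
                else st)
              (ls, queue)
            = ((pvRevBuild lib_to_libs).getD current []).foldl
              (fun (st : PySem.Set String × List String) lib =>
                if !(PySem.Set.contains v' lib) then
                  (PySem.Set.add st.1 lib, st.2 ++ [lib])
                else st)
              (ls, queue) := by
          rw [pv_revBuild_getD, List.foldl_map, List.foldl_filter]
          have hfun :
              (fun (st : PySem.Set String × List String) (p : String × List String) =>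
                if p.2.contains current = true then
                  if !(PySem.Set.contains v' p.1) then
                    (PySem.Set.add st.1 p.1, st.2 ++ [p.1])
                  else st
                else st)
              = (fun (st : PySem.Set String × List String) (p : String × List String) =>
                if p.2.contains current && !(PySem.Set.contains v' p.1) then
                  (PySem.Set.add st.1 p.1, st.2 ++ [p.1])
                else st) := by
            funext st p
            by_cases h : current ∈ p.2 <;> by_cases h2 : p.1 ∈ v' <;> simp [h, h2]
          rw [hfun]
        have hexes :
            PySem.Set.update es ((pvRevBuild exe_to_libs).getD current [])
            = exe_to_libs.foldl
                (fun es p => if p.2.contains current then PySem.Set.add es p.1 else es) es := by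
          rw [pv_revBuild_getD, PySem.Set.update, List.foldl_map, List.foldl_filter]
        rw [ih, hcand, pv_pair_foldl, ← hexes]

-- ===== VERDICT (by name: the statement is the Claim_ definition above) =====
theorem find_impacted_targets_spec : Claim_equal_find_impacted_targets := by
  intro library lib_to_libs exe_to_libs _
  unfold Spec_find_impacted_targets find_impacted_targets find_impacted_targets_alt
  exact (pv_loop_eq lib_to_libs exe_to_libs _ _ _ _ _).symm
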